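-- pv_equiv track=rewrite | github.com/cbguder/advent-of-code | 2023/12/part1.py | subalternate
-- ===== SOURCE A (Python) =====
-- def subalternate(s):
--     if len(s) == 0:
--         yield ""
--         return
--
--     if "?" not in s:
--         yield s
--         return
--
--     if s[0] == "?":
--         for ss in subalternate(s[1:]):
--             yield "#" + ss
--             yield "." + ss
--         return
--
--     for ss in subalternate(s[1:]):
--         yield s[0] + ss
-- ===== SOURCE B (Python) =====
-- def subalternate(s):
--     res = [""]
--     for ch in s:
--         if ch == "?":
--             res = [p + b for b in "#." for p in res]
--         else:
--             res = [p + ch for p in res]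
--     return res
-- ===== Notes on version B (the rewrite author's own statement) =====
-- stated objective: simpler
-- what changed: Replaces A's generator recursion (with a repeated '?'-membership scan at every level) by a single forward loop that builds the list of prefixes iteratively, expanding at each '?'.
import Mathlib
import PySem

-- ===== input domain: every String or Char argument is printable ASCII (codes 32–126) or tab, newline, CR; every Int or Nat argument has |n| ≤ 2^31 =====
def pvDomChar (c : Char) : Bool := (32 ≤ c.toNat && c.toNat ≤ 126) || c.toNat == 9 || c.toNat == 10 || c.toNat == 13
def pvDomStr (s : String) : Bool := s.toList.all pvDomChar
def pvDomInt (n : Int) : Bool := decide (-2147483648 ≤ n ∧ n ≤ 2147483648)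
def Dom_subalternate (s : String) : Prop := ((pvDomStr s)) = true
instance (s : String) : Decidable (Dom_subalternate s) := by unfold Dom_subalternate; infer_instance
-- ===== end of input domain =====

-- B replaces A's generator recursion by one forward loop over the characters that
-- expands an accumulator of prefixes at each wildcard (objective: simpler).

-- ===== PORT A =====
-- A's recursion, over the character list (strings handled as their char lists; same
-- yields in the same order, collected into a list).
def subalternateA : List Char → List (List Char)
  | [] => [[]]
  | c :: rest =>
    if ¬ ('?' ∈ (c :: rest)) then [c :: rest]
    else if c = '?' then
      (subalternateA rest).flatMap (fun ss => ['#' :: ss, '.' :: ss])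
    else
      (subalternateA rest).map (fun ss => c :: ss)

def subalternate (s : String) : List String :=
  (subalternateA s.toList).map (fun l => String.ofList l)

-- ===== PORT B =====
-- one step of Source B's loop body
def subalternateStepB (acc : List (List Char)) (c : Char) : List (List Char) :=
  if c = '?' then
    (['#', '.'] : List Char).flatMap (fun b => acc.map (fun p => p ++ [b]))
  else
    acc.map (fun p => p ++ [c])

def subalternate_alt (s : String) : List String :=
  (s.toList.foldl subalternateStepB [[]]).map (fun l => String.ofList l)

-- ===== PRECONDITION & SPEC =====
def Spec_subalternate (s : String) (out : List String) : Prop := out = subalternate_alt s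
instance (s : String) (out : List String) : Decidable (Spec_subalternate s out) := by unfold Spec_subalternate; infer_instance

-- ===== CLAIM (what is proved, stated in full; the proofs are below) =====
def Claim_equal_subalternate : Prop := ∀ (s : String), Dom_subalternate s → Spec_subalternate s (subalternate s)

-- ===== LEMMAS AND PROOFS =====

-- A's recursion without the wildcard-membership short-circuit (proof device)
def subalternateA' : List Char → List (List Char)
  | [] => [[]]
  | c :: rest =>
    if c = '?' then
      (subalternateA' rest).flatMap (fun ss => ['#' :: ss, '.' :: ss])
    else
      (subalternateA' rest).map (fun ss => c :: ss)

theorem subalternateA'_noQ (l : List Char) (h : '?' ∉ l) : subalternateA' l = [l] := by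
  induction l with
  | nil => rfl
  | cons c rest ih =>
    have hc : c ≠ '?' := fun hc => h (hc ▸ List.mem_cons_self)
    have hr : '?' ∉ rest := fun hm => h (List.mem_cons_of_mem _ hm)
    simp [subalternateA', hc, ih hr]

theorem subalternateA_eq (l : List Char) : subalternateA l = subalternateA' l := by
  induction l with
  | nil => rfl
  | cons c rest ih =>
    by_cases h : '?' ∈ (c :: rest)
    · simp only [subalternateA, h, not_true_eq_false, if_false, ih]
      rfl
    · simp only [subalternateA, h, not_false_eq_true, if_true]
      exact (subalternateA'_noQ _ h).symm

theorem foldl_stepB (l : List Char) :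
    ∀ (acc : List (List Char)),
      l.foldl subalternateStepB acc
        = (subalternateA' l).flatMap (fun t => acc.map (fun p => p ++ t)) := by
  induction l with
  | nil => intro acc; simp [subalternateA']
  | cons c rest ih =>
    intro acc
    by_cases hc : c = '?'
    · subst hc
      simp only [List.foldl_cons, ih, subalternateA', reduceIte, List.flatMap_assoc]
      congr 1
      funext t
      simp [subalternateStepB, List.map_map, Function.comp_def, List.append_assoc]
    · simp only [List.foldl_cons, ih, subalternateA', if_neg hc, List.flatMap_map]
      congr 1
      funext t
      simp [subalternateStepB, hc, List.map_map, Function.comp_def]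

theorem foldl_stepB_nil (l : List Char) :
    l.foldl subalternateStepB [[]] = subalternateA' l := by
  rw [foldl_stepB]
  simp

-- ===== VERDICT (by name: the statement is the Claim_ definition above) =====
theorem subalternate_spec : Claim_equal_subalternate := by
  intro s _
  unfold Spec_subalternate subalternate subalternate_alt
  rw [subalternateA_eq, foldl_stepB_nil]
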